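-- pv_equiv track=rewrite | github.com/Datus-ai/Datus-agent | datus/utils/benchmark_utils.py | compute_table_matches
-- ===== SOURCE A (Python) =====
-- from typing import Any, Dict, Iterable, List, Mapping, Optional, Protocol, Sequence, Tuple
--
-- def _normalize_field_name(name: str) -> str:
--     return name.strip().lower().replace(" ", "_") if isinstance(name, str) else ""
--
-- def _unique_preserve_order(items: Iterable[str]) -> list[str]:
--     seen = set()
--     result: list[str] = []
--     for item in items:
--         if not item:
--             continue
--         normalized = str(item).strip()
--         if not normalized or normalized in seen:
--             continue
--         seen.add(normalized)
--         result.append(normalized)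
--     return result
--
-- def compute_table_matches(actual_tables: Iterable[str], expected_tables: Iterable[str]) -> list[str]:
--     normalized_actual = {_normalize_field_name(table): table for table in actual_tables if table}
--     matches: list[str] = []
--     for table in expected_tables:
--         if not table:
--             continue
--         normalized = _normalize_field_name(table)
--         if normalized in normalized_actual:
--             matches.append(table)
--     return _unique_preserve_order(matches)
-- ===== SOURCE B (Python) =====
-- def _normalize_field_name(name: str) -> str:
--     return name.strip().lower().replace(" ", "_") if isinstance(name, str) else ""
--
-- def compute_table_matches(actual_tables, expected_tables):
--     actual_norms = {_normalize_field_name(t) for t in actual_tables if t}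
--     result = []
--     rest = list(expected_tables)
--     while rest:
--         head = rest.pop(0)
--         if not head or _normalize_field_name(head) not in actual_norms:
--             continue
--         stripped = str(head).strip()
--         if not stripped:
--             continue
--         result.append(stripped)
--         # no seen-set: delete all upcoming duplicates of this stripped value instead
--         rest = [t for t in rest if str(t).strip() != stripped]
--     return result
-- ===== Notes on version B (the rewrite author's own statement) =====
-- stated objective: alternative
-- what changed: B keeps no seen-set and no dedup pass at all: it consumes a worklist of the expected tables, and whenever it emits a stripped name it deletes every upcoming entry with the same stripped form from the worklist, so deduplication is done by deletion-ahead instead of A's dict build plus _unique_preserve_order seen-set pass.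
import Mathlib
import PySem

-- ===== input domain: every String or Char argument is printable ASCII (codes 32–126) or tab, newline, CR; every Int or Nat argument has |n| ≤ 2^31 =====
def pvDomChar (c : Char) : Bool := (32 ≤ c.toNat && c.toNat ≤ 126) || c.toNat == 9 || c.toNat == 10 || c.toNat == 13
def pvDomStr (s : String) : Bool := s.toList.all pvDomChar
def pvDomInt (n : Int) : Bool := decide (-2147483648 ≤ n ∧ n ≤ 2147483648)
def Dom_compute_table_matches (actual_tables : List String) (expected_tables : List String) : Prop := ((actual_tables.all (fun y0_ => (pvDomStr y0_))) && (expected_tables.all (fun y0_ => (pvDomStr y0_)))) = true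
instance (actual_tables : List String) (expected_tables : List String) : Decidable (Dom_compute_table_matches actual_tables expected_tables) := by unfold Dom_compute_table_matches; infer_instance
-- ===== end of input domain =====

-- B replaces A's dict build + seen-set dedup pass with a worklist that deletes upcoming
-- duplicates of each emitted stripped name (objective: alternative; no seen-set at all).

-- ===== PORT A =====
def pyNormalizeFieldName (name : String) : String :=
  PySem.Str.replace (PySem.Str.lower (PySem.Str.strip name)) " " "_"

def uniquePreserveOrder (items : List String) : List String :=
  (items.foldl (fun (st : PySem.Set String × List String) item =>
    if item = "" then st
    else
      let normalized := PySem.Str.strip item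
      if normalized = "" ∨ PySem.Set.contains st.1 normalized then st
      else (PySem.Set.add st.1 normalized, st.2 ++ [normalized])) (PySem.Set.empty, [])).2

def compute_table_matches (actual_tables : List String) (expected_tables : List String) : List String :=
  let normalized_actual : PySem.Dict String String :=
    (actual_tables.filter (fun t => t ≠ "")).foldl
      (fun d t => d.insert (pyNormalizeFieldName t) t) PySem.Dict.empty
  let matchList : List String := expected_tables.foldl (fun acc t =>
    if t = "" then acc
    else if normalized_actual.contains (pyNormalizeFieldName t) then acc ++ [t]
    else acc) []
  uniquePreserveOrder matchList

-- ===== PORT B =====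
-- the while loop of Source B: pop the head; on emit, delete upcoming duplicates of `stripped`
def goB (norms : PySem.Set String) : List String → List String → List String
  | [], result => result
  | head :: rest, result =>
    if head = "" ∨ ¬ PySem.Set.contains norms (pyNormalizeFieldName head) then
      goB norms rest result
    else
      let stripped := PySem.Str.strip head
      if stripped = "" then goB norms rest result
      else goB norms (rest.filter (fun t => PySem.Str.strip t ≠ stripped)) (result ++ [stripped])
  termination_by rest _ => rest.length
  decreasing_by
    · simp
    · simp
    · exact Nat.lt_succ_of_le (by simpa using List.length_filter_le _ rest.attach)

def compute_table_matches_alt (actual_tables : List String) (expected_tables : List String) : List String :=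
  let actual_norms : PySem.Set String :=
    PySem.Set.ofList ((actual_tables.filter (fun t => t ≠ "")).map pyNormalizeFieldName)
  goB actual_norms expected_tables []

-- ===== PRECONDITION & SPEC =====
def Spec_compute_table_matches (actual_tables : List String) (expected_tables : List String) (out : List String) : Prop := out = compute_table_matches_alt actual_tables expected_tables
instance (actual_tables : List String) (expected_tables : List String) (out : List String) : Decidable (Spec_compute_table_matches actual_tables expected_tables out) := by unfold Spec_compute_table_matches; infer_instance

-- ===== CLAIM (what is proved, stated in full; the proofs are below) =====
def Claim_equal_compute_table_matches : Prop := ∀ (actual_tables : List String) (expected_tables : List String), Dom_compute_table_matches actual_tables expected_tables → Spec_compute_table_matches actual_tables expected_tables (compute_table_matches actual_tables expected_tables)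

-- ===== LEMMAS AND PROOFS =====

-- canonical dedup-ahead recursion both sides are reduced to
def uniqGo : List String → List String
  | [] => []
  | h :: t =>
    let s := PySem.Str.strip h
    if s = "" then uniqGo t
    else s :: uniqGo (t.filter (fun x => PySem.Str.strip x ≠ s))
  termination_by xs => xs.length
  decreasing_by
    · simp
    · exact Nat.lt_succ_of_le (by simpa using List.length_filter_le _ t.attach)

-- A's dict membership test coincides with B's set membership test
theorem dict_contains_eq_set_contains (actual_tables : List String) (k : String) :
    ((actual_tables.filter (fun t => t ≠ "")).foldl
      (fun d t => d.insert (pyNormalizeFieldName t) t)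
      (PySem.Dict.empty : PySem.Dict String String)).contains k
    = PySem.Set.contains
        (PySem.Set.ofList ((actual_tables.filter (fun t => t ≠ "")).map pyNormalizeFieldName)) k := by
  rw [PySem.Dict.contains_eq_decide_mem_keys, PySem.Dict.keys_foldl_insert_key,
    PySem.Dict.keys_empty, PySem.Set.update_nil_left]
  simp

-- A's matches loop is a filter
theorem matches_eq_filter (d : PySem.Dict String String) (xs : List String) (acc : List String) :
    xs.foldl (fun acc t =>
      if t = "" then acc
      else if d.contains (pyNormalizeFieldName t) then acc ++ [t]
      else acc) acc
    = acc ++ xs.filter (fun t => t ≠ "" && d.contains (pyNormalizeFieldName t)) := by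
  induction xs generalizing acc with
  | nil => simp
  | cons x xs ih =>
    simp only [List.foldl_cons, List.filter_cons]
    by_cases hx : x = "" <;> by_cases hc : d.contains (pyNormalizeFieldName x) <;>
      simp [hx, hc, ih]

-- Bool bridge for non-membership
theorem contains_eq_false_of_not_mem {S : PySem.Set String} {y : String} (h : y ∉ S) :
    PySem.Set.contains S y = false := by
  cases hq : PySem.Set.contains S y with
  | false => rfl
  | true => exact absurd ((PySem.Set.contains_iff _ _).mp hq) h

-- the seen-set fold of _unique_preserve_order equals uniqGo after dropping already-seen strips
theorem uniqFold_eq_uniqGo (n : Nat) (xs : List String) (hn : xs.length ≤ n)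
    (S : PySem.Set String) (acc : List String) :
    (xs.foldl (fun (st : PySem.Set String × List String) item =>
      if item = "" then st
      else
        let normalized := PySem.Str.strip item
        if normalized = "" ∨ PySem.Set.contains st.1 normalized then st
        else (PySem.Set.add st.1 normalized, st.2 ++ [normalized])) (S, acc)).2
    = acc ++ uniqGo (xs.filter (fun x => !(PySem.Set.contains S (PySem.Str.strip x)))) := by
  induction n generalizing xs S acc with
  | zero =>
    have : xs = [] := List.length_eq_zero_iff.mp (Nat.le_zero.mp hn)
    simp [this, uniqGo]
  | succ n ih =>
    match xs with
    | [] => simp [uniqGo]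
    | h :: t =>
      have ht : t.length ≤ n := Nat.le_of_succ_le_succ hn
      simp only [List.foldl_cons, List.filter_cons]
      by_cases hmem : PySem.Str.strip h ∈ S
      · have hc : PySem.Set.contains S (PySem.Str.strip h) = true :=
          (PySem.Set.contains_iff _ _).mpr hmem
        have hskip : (if h = "" then (S, acc)
            else if PySem.Str.strip h = "" ∨ PySem.Set.contains S (PySem.Str.strip h) then (S, acc)
            else (PySem.Set.add S (PySem.Str.strip h), acc ++ [PySem.Str.strip h])) = (S, acc) := by
          by_cases hh : h = "" <;> simp [hh, hmem]
        rw [hskip, if_neg (by simp [hmem])]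
        exact ih t ht S acc
      · have hc : PySem.Set.contains S (PySem.Str.strip h) = false :=
          contains_eq_false_of_not_mem hmem
        by_cases hs : PySem.Str.strip h = ""
        · have hskip : (if h = "" then (S, acc)
              else if PySem.Str.strip h = "" ∨ PySem.Set.contains S (PySem.Str.strip h) then (S, acc)
              else (PySem.Set.add S (PySem.Str.strip h), acc ++ [PySem.Str.strip h])) = (S, acc) := by
            by_cases hh : h = "" <;> simp [hh, hs]
          rw [hskip, if_pos (by simp [hmem])]
          rw [uniqGo]
          rw [if_pos hs]
          exact ih t ht S acc
        · have hh : h ≠ "" := by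
            intro he; apply hs; rw [he]; decide
          have hstep : (if h = "" then (S, acc)
              else if PySem.Str.strip h = "" ∨ PySem.Set.contains S (PySem.Str.strip h) then (S, acc)
              else (PySem.Set.add S (PySem.Str.strip h), acc ++ [PySem.Str.strip h]))
              = (PySem.Set.add S (PySem.Str.strip h), acc ++ [PySem.Str.strip h]) := by
            simp [hh, hs, hmem]
          rw [hstep, if_pos (by simp [hmem])]
          rw [uniqGo]
          rw [if_neg hs]
          rw [ih t ht _ _]
          have hfilt : List.filter
              (fun x => !PySem.Set.contains (PySem.Set.add S (PySem.Str.strip h)) (PySem.Str.strip x)) t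
              = List.filter (fun x => PySem.Str.strip x ≠ PySem.Str.strip h)
                  (List.filter (fun x => !PySem.Set.contains S (PySem.Str.strip x)) t) := by
            rw [List.filter_filter]
            apply List.filter_congr
            intro x _
            simp [Bool.and_comm]
          rw [hfilt]
          simp

-- B's worklist recursion equals uniqGo of the match-filtered list
theorem goB_eq_uniqGo (S : PySem.Set String) (n : Nat) (xs : List String) (hn : xs.length ≤ n)
    (acc : List String) :
    goB S xs acc
    = acc ++ uniqGo (xs.filter (fun t => t ≠ "" && PySem.Set.contains S (pyNormalizeFieldName t))) := by
  induction n generalizing xs acc with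
  | zero =>
    have : xs = [] := List.length_eq_zero_iff.mp (Nat.le_zero.mp hn)
    simp [this, goB, uniqGo]
  | succ n ih =>
    match xs with
    | [] => simp [goB, uniqGo]
    | h :: t =>
      have ht : t.length ≤ n := Nat.le_of_succ_le_succ hn
      simp only [goB, List.filter_cons]
      by_cases hh : h = ""
      · rw [if_pos (Or.inl hh), if_neg (by simp [hh])]
        exact ih t ht acc
      · by_cases hcm : pyNormalizeFieldName h ∈ S
        · have hc : PySem.Set.contains S (pyNormalizeFieldName h) = true :=
            (PySem.Set.contains_iff _ _).mpr hcm
          have hfcond : (decide (h ≠ "") && PySem.Set.contains S (pyNormalizeFieldName h)) = true := by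
            rw [hc]
            simp [hh]
          rw [if_neg (by simp [hh, hcm]), if_pos hfcond]
          by_cases hs : PySem.Str.strip h = ""
          · rw [if_pos hs, uniqGo, if_pos hs]
            exact ih t ht acc
          · rw [if_neg hs, uniqGo, if_neg hs]
            rw [ih (t.filter (fun x => PySem.Str.strip x ≠ PySem.Str.strip h))
              (le_trans (List.length_filter_le _ _) ht) (acc ++ [PySem.Str.strip h])]
            have hfilt : List.filter (fun t => decide (t ≠ "") && PySem.Set.contains S (pyNormalizeFieldName t))
                (List.filter (fun x => PySem.Str.strip x ≠ PySem.Str.strip h) t)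
                = List.filter (fun x => PySem.Str.strip x ≠ PySem.Str.strip h)
                    (List.filter (fun t => decide (t ≠ "") && PySem.Set.contains S (pyNormalizeFieldName t)) t) := by
              rw [List.filter_filter, List.filter_filter]
              apply List.filter_congr
              intro x _
              simp [Bool.and_comm]
            rw [hfilt]
            simp
        · rw [if_pos (Or.inr (by simp [hcm])), if_neg (by simp [hcm])]
          exact ih t ht acc

-- ===== VERDICT (by name: the statement is the Claim_ definition above) =====
theorem compute_table_matches_spec : Claim_equal_compute_table_matches := by
  intro actual_tables expected_tables _
  show uniquePreserveOrder (expected_tables.foldl (fun acc t =>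
      if t = "" then acc
      else if (((actual_tables.filter (fun t => t ≠ "")).foldl
          (fun d t => d.insert (pyNormalizeFieldName t) t)
          (PySem.Dict.empty : PySem.Dict String String))).contains (pyNormalizeFieldName t)
        then acc ++ [t] else acc) [])
    = goB (PySem.Set.ofList ((actual_tables.filter (fun t => t ≠ "")).map pyNormalizeFieldName))
        expected_tables []
  rw [matches_eq_filter, List.nil_append]
  unfold uniquePreserveOrder
  rw [uniqFold_eq_uniqGo _ _ le_rfl, List.nil_append]
  rw [goB_eq_uniqGo _ expected_tables.length _ le_rfl [], List.nil_append]
  have hempty : List.filter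
      (fun x => !(PySem.Set.contains (PySem.Set.empty : PySem.Set String) (PySem.Str.strip x)))
      (expected_tables.filter (fun t => t ≠ "" &&
        (((actual_tables.filter (fun t => t ≠ "")).foldl
          (fun d t => d.insert (pyNormalizeFieldName t) t)
          (PySem.Dict.empty : PySem.Dict String String))).contains (pyNormalizeFieldName t)))
      = expected_tables.filter (fun t => t ≠ "" &&
        (((actual_tables.filter (fun t => t ≠ "")).foldl
          (fun d t => d.insert (pyNormalizeFieldName t) t)
          (PySem.Dict.empty : PySem.Dict String String))).contains (pyNormalizeFieldName t)) := by
    apply List.filter_eq_self.mpr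
    intro x _
    simp [PySem.Set.empty]
  rw [hempty]
  congr 1
  apply List.filter_congr
  intro t _
  rw [dict_contains_eq_set_contains]
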